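-- pv_equiv track=rewrite | github.com/zulumonkeymetallic/bob | hermes_cli/main.py | _coalesce_session_name_args
-- ===== SOURCE A (Python) =====
-- def _coalesce_session_name_args(argv: list) -> list:
--     """Join unquoted multi-word session names after -c/--continue and -r/--resume.
--
--     When a user types ``hermes -c Pokemon Agent Dev`` without quoting the
--     session name, argparse sees three separate tokens.  This function merges
--     them into a single argument so argparse receives
--     ``['-c', 'Pokemon Agent Dev']`` instead.
--
--     Tokens are collected after the flag until we hit another flag (``-*``)
--     or a known top-level subcommand.
--     """
--     _SUBCOMMANDS = {
--         "chat", "model", "gateway", "setup", "whatsapp", "login", "logout", "auth",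
--         "status", "cron", "doctor", "config", "pairing", "skills", "tools",
--         "mcp", "sessions", "insights", "version", "update", "uninstall",
--         "profile", "dashboard",
--         "honcho", "claw", "plugins", "acp",
--         "webhook", "memory", "dump", "debug", "backup", "import", "completion", "logs",
--     }
--     _SESSION_FLAGS = {"-c", "--continue", "-r", "--resume"}
--
--     result = []
--     i = 0
--     while i < len(argv):
--         token = argv[i]
--         if token in _SESSION_FLAGS:
--             result.append(token)
--             i += 1
--             # Collect subsequent non-flag, non-subcommand tokens as one name
--             parts: list = []
--             while i < len(argv) and not argv[i].startswith("-") and argv[i] not in _SUBCOMMANDS: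
--                 parts.append(argv[i])
--                 i += 1
--             if parts:
--                 result.append(" ".join(parts))
--         else:
--             result.append(token)
--             i += 1
--     return result
-- ===== SOURCE B (Python) =====
-- def _coalesce_session_name_args(argv: list) -> list:
--     _SUBCOMMANDS = {
--         "chat", "model", "gateway", "setup", "whatsapp", "login", "logout", "auth",
--         "status", "cron", "doctor", "config", "pairing", "skills", "tools",
--         "mcp", "sessions", "insights", "version", "update", "uninstall",
--         "profile", "dashboard",
--         "honcho", "claw", "plugins", "acp",
--         "webhook", "memory", "dump", "debug", "backup", "import", "completion", "logs",
--     }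
--     _SESSION_FLAGS = {"-c", "--continue", "-r", "--resume"}
--
--     result = []
--     parts = []
--     collecting = False
--     for token in argv:
--         if collecting and not token.startswith("-") and token not in _SUBCOMMANDS:
--             parts.append(token)
--         else:
--             if parts:
--                 result.append(" ".join(parts))
--                 parts = []
--             result.append(token)
--             collecting = token in _SESSION_FLAGS
--     if parts:
--         result.append(" ".join(parts))
--     return result
-- ===== Notes on version B (the rewrite author's own statement) =====
-- stated objective: simpler
-- what changed: Replaced A's nested index-based while loops (outer scan plus inner collection loop with manual index advancement) by a single flat for-loop state machine over argv that maintains a 'collecting' flag and a parts buffer, flushing the buffer before any terminating token and once after the loop.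
import Mathlib
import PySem

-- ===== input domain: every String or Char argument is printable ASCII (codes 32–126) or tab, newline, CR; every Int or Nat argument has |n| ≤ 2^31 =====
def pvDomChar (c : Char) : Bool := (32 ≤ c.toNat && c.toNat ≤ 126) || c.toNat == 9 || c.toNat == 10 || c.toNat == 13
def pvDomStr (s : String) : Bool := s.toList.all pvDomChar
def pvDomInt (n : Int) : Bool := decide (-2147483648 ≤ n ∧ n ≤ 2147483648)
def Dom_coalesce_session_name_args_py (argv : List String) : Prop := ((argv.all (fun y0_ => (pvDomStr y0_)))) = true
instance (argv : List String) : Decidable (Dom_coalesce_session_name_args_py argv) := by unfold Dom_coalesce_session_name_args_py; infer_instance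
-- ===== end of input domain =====

-- B replaces A's nested index-based while loops by a single flat state-machine pass
-- (buffer + collecting flag, final flush); objective: simpler decomposition, same cost.

-- ===== PORT A =====
def pvSubcommands : PySem.Set String := PySem.Set.ofList
  ["chat", "model", "gateway", "setup", "whatsapp", "login", "logout", "auth",
   "status", "cron", "doctor", "config", "pairing", "skills", "tools",
   "mcp", "sessions", "insights", "version", "update", "uninstall",
   "profile", "dashboard",
   "honcho", "claw", "plugins", "acp",
   "webhook", "memory", "dump", "debug", "backup", "import", "completion", "logs"]

def pvSessionFlags : PySem.Set String := PySem.Set.ofList ["-c", "--continue", "-r", "--resume"]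

-- A's inner while loop: collect non-flag, non-subcommand tokens; returns (parts, rest of argv)
def pvCollectA : List String → List String × List String
  | [] => ([], [])
  | t :: ts =>
    if ¬ PySem.Str.startswith t "-" ∧ t ∉ pvSubcommands then
      ((t :: (pvCollectA ts).1), (pvCollectA ts).2)
    else ([], t :: ts)

theorem pvCollectA_snd_length (ts : List String) : (pvCollectA ts).2.length ≤ ts.length := by
  induction ts with
  | nil => simp [pvCollectA]
  | cons t ts ih =>
    simp only [pvCollectA]
    split_ifs with h
    · exact le_trans ih (Nat.le_succ _)
    · simp

-- A's outer while loop
def coalesce_session_name_args_py : List String → List String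
  | [] => []
  | t :: ts =>
    if t ∈ pvSessionFlags then
      if (pvCollectA ts).1 ≠ [] then
        t :: PySem.Str.join " " (pvCollectA ts).1 :: coalesce_session_name_args_py (pvCollectA ts).2
      else
        t :: coalesce_session_name_args_py (pvCollectA ts).2
    else t :: coalesce_session_name_args_py ts
termination_by argv => argv.length
decreasing_by
  · exact Nat.lt_succ_of_le (pvCollectA_snd_length ts)
  · exact Nat.lt_succ_of_le (pvCollectA_snd_length ts)
  · exact Nat.lt_succ_self _

-- ===== PORT B =====
-- flush: emit the joined buffer if non-empty (B's `if parts:` block)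
def pvFlushB (res parts : List String) : List String :=
  if parts ≠ [] then res ++ [PySem.Str.join " " parts] else res

-- one step of B's flat loop over argv; state = (result, parts, collecting)
def pvStepB (st : List String × List String × Bool) (t : String) :
    List String × List String × Bool :=
  if st.2.2 = true ∧ ¬ PySem.Str.startswith t "-" ∧ t ∉ pvSubcommands then
    (st.1, st.2.1 ++ [t], st.2.2)
  else
    (pvFlushB st.1 st.2.1 ++ [t], [], decide (t ∈ pvSessionFlags))

def coalesce_session_name_args_py_alt (argv : List String) : List String :=
  let st := argv.foldl pvStepB ([], [], false)
  pvFlushB st.1 st.2.1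

-- ===== PRECONDITION & SPEC =====
def Spec_coalesce_session_name_args_py (argv : List String) (out : List String) : Prop := out = coalesce_session_name_args_py_alt argv
instance (argv : List String) (out : List String) : Decidable (Spec_coalesce_session_name_args_py argv out) := by unfold Spec_coalesce_session_name_args_py; infer_instance

-- ===== CLAIM (what is proved, stated in full; the proofs are below) =====
def Claim_equal_coalesce_session_name_args_py : Prop := ∀ (argv : List String), Dom_coalesce_session_name_args_py argv → Spec_coalesce_session_name_args_py argv (coalesce_session_name_args_py argv)

-- ===== LEMMAS AND PROOFS =====

-- The loop invariant: running B's fold from a non-collecting state appends A's output;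
-- from a collecting state it first plays out A's inner collect loop.
theorem pvInvariant (ts : List String) :
    (∀ res, pvFlushB (ts.foldl pvStepB (res, [], false)).1 (ts.foldl pvStepB (res, [], false)).2.1
        = res ++ coalesce_session_name_args_py ts)
    ∧ (∀ res parts, pvFlushB (ts.foldl pvStepB (res, parts, true)).1 (ts.foldl pvStepB (res, parts, true)).2.1
        = pvFlushB res (parts ++ (pvCollectA ts).1)
            ++ coalesce_session_name_args_py (pvCollectA ts).2) := by
  induction ts with
  | nil =>
    constructor
    · intro res; simp [pvFlushB, coalesce_session_name_args_py]
    · intro res parts; simp [pvCollectA, coalesce_session_name_args_py]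
  | cons t ts ih =>
    obtain ⟨ihF, ihT⟩ := ih
    constructor
    · intro res
      by_cases hf : t ∈ pvSessionFlags
      · have hstep : pvStepB (res, [], false) t = (res ++ [t], [], true) := by
          simp [pvStepB, pvFlushB, hf]
        rw [List.foldl_cons, hstep, ihT (res ++ [t]) []]
        simp only [List.nil_append]
        rw [coalesce_session_name_args_py]
        simp only [if_pos hf]
        by_cases hp : (pvCollectA ts).1 = []
        · simp [pvFlushB, hp]
        · simp [pvFlushB, hp]
      · have hstep : pvStepB (res, [], false) t = (res ++ [t], [], false) := by
          simp [pvStepB, pvFlushB, hf]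
        rw [List.foldl_cons, hstep, ihF (res ++ [t])]
        rw [coalesce_session_name_args_py]
        simp [hf]
    · intro res parts
      by_cases hc : ¬ PySem.Str.startswith t "-" ∧ t ∉ pvSubcommands
      · have h1 : PySem.Chars.startswith t.toList ['-'] = false := by
          simpa using eq_false_of_ne_true hc.1
        have hstep : pvStepB (res, parts, true) t = (res, parts ++ [t], true) := by
          simp [pvStepB, hc.2, h1]
        rw [List.foldl_cons, hstep, ihT res (parts ++ [t])]
        rw [pvCollectA]
        simp only [if_pos hc, List.append_assoc, List.cons_append, List.nil_append]
      · have hstep : pvStepB (res, parts, true) t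
            = (pvFlushB res parts ++ [t], [], decide (t ∈ pvSessionFlags)) := by
          rw [pvStepB]
          rw [if_neg]
          intro h; exact hc ⟨h.2.1, h.2.2⟩
        rw [pvCollectA, if_neg hc]
        by_cases hf : t ∈ pvSessionFlags
        · rw [List.foldl_cons, hstep]
          simp only [hf, decide_true]
          rw [ihT (pvFlushB res parts ++ [t]) []]
          simp only [List.nil_append]
          rw [coalesce_session_name_args_py]
          simp only [if_pos hf, List.append_nil]
          by_cases hp : (pvCollectA ts).1 = []
          · simp [pvFlushB, hp]
          · simp [pvFlushB, hp]
        · rw [List.foldl_cons, hstep]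
          simp only [hf, decide_false]
          rw [ihF (pvFlushB res parts ++ [t])]
          rw [coalesce_session_name_args_py]
          simp [hf, List.append_nil]

-- ===== VERDICT (by name: the statement is the Claim_ definition above) =====
theorem coalesce_session_name_args_py_spec : Claim_equal_coalesce_session_name_args_py := by
  intro argv _
  unfold Spec_coalesce_session_name_args_py coalesce_session_name_args_py_alt
  have h := (pvInvariant argv).1 []
  simpa using h.symm
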